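-- pv_equiv track=rewrite | github.com/erayyap/circutis | circutis/routing.py | _segment_hits_blocker
-- ===== SOURCE A (Python) =====
-- from typing import List, Tuple, Set, Optional, TYPE_CHECKING
--
-- def _segment_hits_blocker(
--
--     start: Tuple[int, int],
--     end: Tuple[int, int],
--     blocked_points: Set[Tuple[int, int]],
-- ) -> bool:
--     """Check if a straight segment would pass through any blocked pin."""
--     if not blocked_points:
--         return False
--
--     x1, y1 = start
--     x2, y2 = end
--
--     if x1 == x2:
--         ymin, ymax = sorted((y1, y2))
--         for bx, by in blocked_points:
--             if bx == x1 and ymin < by < ymax: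
--                 return True
--     elif y1 == y2:
--         xmin, xmax = sorted((x1, x2))
--         for bx, by in blocked_points:
--             if by == y1 and xmin < bx < xmax:
--                 return True
--     return False
-- ===== SOURCE B (Python) =====
-- def _segment_hits_blocker(start, end, blocked_points):
--     """Sort the blocker coordinates on the segment's line, then binary-search
--     for the first one strictly past the lower endpoint and compare it with the
--     upper endpoint."""
--     x1, y1 = start
--     x2, y2 = end
--     if x1 == x2:
--         coords = sorted(by for bx, by in blocked_points if bx == x1)
--         lo, hi = min(y1, y2), max(y1, y2)
--     elif y1 == y2:
--         coords = sorted(bx for bx, by in blocked_points if by == y1)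
--         lo, hi = min(x1, x2), max(x1, x2)
--     else:
--         return False
--     i, j = 0, len(coords)
--     while i < j:
--         m = (i + j) // 2
--         if coords[m] <= lo:
--             i = m + 1
--         else:
--             j = m
--     return i < len(coords) and coords[i] < hi
-- ===== Notes on version B (the rewrite author's own statement) =====
-- stated objective: alternative
-- what changed: B replaces A's linear scan of the blockers by a staged pipeline: filter-and-sort the blocker coordinates on the segment's line, then a hand-written binary search finds the first coordinate strictly past the lower endpoint, which is compared with the upper endpoint.
import Mathlib
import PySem

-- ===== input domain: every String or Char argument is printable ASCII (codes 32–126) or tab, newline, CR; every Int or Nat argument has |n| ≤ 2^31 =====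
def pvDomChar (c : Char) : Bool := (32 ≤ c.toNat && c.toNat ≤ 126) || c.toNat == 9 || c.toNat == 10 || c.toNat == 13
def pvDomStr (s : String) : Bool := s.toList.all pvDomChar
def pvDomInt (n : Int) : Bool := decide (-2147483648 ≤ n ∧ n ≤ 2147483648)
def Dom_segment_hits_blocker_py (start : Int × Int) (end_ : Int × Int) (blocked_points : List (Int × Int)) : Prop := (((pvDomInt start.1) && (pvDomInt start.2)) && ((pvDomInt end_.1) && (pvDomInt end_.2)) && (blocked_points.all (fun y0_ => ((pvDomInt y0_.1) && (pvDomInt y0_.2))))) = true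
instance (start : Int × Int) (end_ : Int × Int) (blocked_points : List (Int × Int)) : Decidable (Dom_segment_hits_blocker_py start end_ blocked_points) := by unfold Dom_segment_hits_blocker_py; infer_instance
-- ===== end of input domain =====

-- B replaces A's linear scan of the blockers by sort + binary search on the
-- segment's line (objective: alternative; same result, proved equivalent).

-- ===== PORT A =====
-- A: early return on empty set, then one scan of blocked points with a strict interval test.
def segment_hits_blocker_py (start : Int × Int) (end_ : Int × Int) (blocked_points : List (Int × Int)) : Bool :=
  if blocked_points = [] then false
  else
    let x1 := start.1; let y1 := start.2
    let x2 := end_.1; let y2 := end_.2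
    if x1 = x2 then
      let ymin := if y1 ≤ y2 then y1 else y2
      let ymax := if y1 ≤ y2 then y2 else y1
      blocked_points.any (fun p => decide (p.1 = x1) && decide (ymin < p.2) && decide (p.2 < ymax))
    else if y1 = y2 then
      let xmin := if x1 ≤ x2 then x1 else x2
      let xmax := if x1 ≤ x2 then x2 else x1
      blocked_points.any (fun p => decide (p.2 = y1) && decide (xmin < p.1) && decide (p.1 < xmax))
    else false

-- ===== PORT B =====
-- B's while-loop: binary search for the first index with coords[idx] > lo.
-- coords.getD m 0 transliterates coords[m]; the index is always in range (i < j ≤ len).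
def pvBsearchGT (coords : List Int) (lo : Int) (i j : Nat) : Nat :=
  if h : i < j then
    let m := (i + j) / 2
    if coords.getD m 0 ≤ lo then pvBsearchGT coords lo (m + 1) j
    else pvBsearchGT coords lo i m
  else i
termination_by j - i
decreasing_by all_goals omega

-- B: sort the blocker coordinates on the segment's line, binary-search for the
-- first one strictly past the lower endpoint, compare it with the upper endpoint.
def segment_hits_blocker_py_alt (start : Int × Int) (end_ : Int × Int) (blocked_points : List (Int × Int)) : Bool :=
  let x1 := start.1; let y1 := start.2
  let x2 := end_.1; let y2 := end_.2
  if x1 = x2 then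
    let coords := PySem.List.sorted ((blocked_points.filter (fun p => decide (p.1 = x1))).map Prod.snd) (fun y => y) false
    let lo := min y1 y2; let hi := max y1 y2
    let i := pvBsearchGT coords lo 0 coords.length
    decide (i < coords.length) && decide (coords.getD i 0 < hi)
  else if y1 = y2 then
    let coords := PySem.List.sorted ((blocked_points.filter (fun p => decide (p.2 = y1))).map Prod.fst) (fun x => x) false
    let lo := min x1 x2; let hi := max x1 x2
    let i := pvBsearchGT coords lo 0 coords.length
    decide (i < coords.length) && decide (coords.getD i 0 < hi)
  else false

-- ===== PRECONDITION & SPEC =====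
def Spec_segment_hits_blocker_py (start : Int × Int) (end_ : Int × Int) (blocked_points : List (Int × Int)) (out : Bool) : Prop := out = segment_hits_blocker_py_alt start end_ blocked_points
instance (start : Int × Int) (end_ : Int × Int) (blocked_points : List (Int × Int)) (out : Bool) : Decidable (Spec_segment_hits_blocker_py start end_ blocked_points out) := by unfold Spec_segment_hits_blocker_py; infer_instance

-- ===== CLAIM =====
def Claim_equal_segment_hits_blocker_py : Prop := ∀ (start : Int × Int) (end_ : Int × Int) (blocked_points : List (Int × Int)), Dom_segment_hits_blocker_py start end_ blocked_points → Spec_segment_hits_blocker_py start end_ blocked_points (segment_hits_blocker_py start end_ blocked_points)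

-- ===== LEMMAS AND PROOFS =====

-- Binary-search invariant: starting from a window [i, j) whose left side is ≤ lo and
-- whose right side is > lo, the result r splits the whole list at the first value > lo.
theorem pvBsearchGT_spec (coords : List Int) (lo : Int)
    (hs : coords.Pairwise (· ≤ ·)) :
    ∀ (n i j : Nat), j - i ≤ n → i ≤ j → j ≤ coords.length →
    (∀ k, k < i → coords.getD k 0 ≤ lo) →
    (∀ k, j ≤ k → k < coords.length → lo < coords.getD k 0) →
    (∀ k, k < pvBsearchGT coords lo i j → coords.getD k 0 ≤ lo) ∧
    (∀ k, pvBsearchGT coords lo i j ≤ k → k < coords.length → lo < coords.getD k 0) ∧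
    pvBsearchGT coords lo i j ≤ coords.length := by
  have hpair : ∀ a b : Nat, a ≤ b → b < coords.length → coords.getD a 0 ≤ coords.getD b 0 := by
    intro a b hab hb
    rcases Nat.eq_or_lt_of_le hab with h | h
    · subst h; exact le_refl _
    · have ha : a < coords.length := lt_trans h hb
      rw [List.getD_eq_getElem _ _ ha, List.getD_eq_getElem _ _ hb]
      exact (List.pairwise_iff_getElem.mp hs) a b ha hb h
  intro n
  induction n with
  | zero =>
    intro i j hn hij hj hlo hhi
    have hji : ¬ i < j := by omega
    rw [pvBsearchGT, dif_neg hji]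
    exact ⟨hlo, fun k hk hklen => hhi k (by omega) hklen, by omega⟩
  | succ n ih =>
    intro i j hn hij hj hlo hhi
    rw [pvBsearchGT]
    by_cases h : i < j
    · rw [dif_pos h]
      by_cases hle : coords.getD ((i + j) / 2) 0 ≤ lo
      · rw [if_pos hle]
        refine ih ((i + j) / 2 + 1) j (by omega) (by omega) hj ?_ hhi
        intro k hk
        by_cases hki : k < i
        · exact hlo k hki
        · exact le_trans (hpair k ((i + j) / 2) (by omega) (by omega)) hle
      · rw [if_neg hle]
        refine ih i ((i + j) / 2) (by omega) (by omega) (by omega) hlo ?_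
        intro k hk hklen
        have := hpair ((i + j) / 2) k hk hklen
        omega
    · rw [dif_neg h]
      exact ⟨hlo, fun k hk hklen => hhi k (by omega) hklen, by omega⟩

-- The sorted + binary-search test equals "some element lies strictly between lo and hi".
theorem bsearch_any (coords : List Int) (lo hi : Int) (hs : coords.Pairwise (· ≤ ·)) :
    (decide (pvBsearchGT coords lo 0 coords.length < coords.length) &&
     decide (coords.getD (pvBsearchGT coords lo 0 coords.length) 0 < hi)) =
    coords.any (fun y => decide (lo < y) && decide (y < hi)) := by
  obtain ⟨h1, h2, h3⟩ := pvBsearchGT_spec coords lo hs coords.length 0 coords.length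
    (by omega) (Nat.zero_le _) (le_refl _)
    (fun k hk => absurd hk (Nat.not_lt_zero k)) (fun k hk hklen => absurd hklen (by omega))
  set r := pvBsearchGT coords lo 0 coords.length with hr
  rw [Bool.eq_iff_iff]
  simp only [Bool.and_eq_true, decide_eq_true_eq, List.any_eq_true]
  constructor
  · rintro ⟨hrlen, hrhi⟩
    refine ⟨coords.getD r 0, ?_, h2 r (le_refl _) hrlen, hrhi⟩
    rw [List.getD_eq_getElem _ _ hrlen]; exact List.getElem_mem _
  · rintro ⟨y, hy, hylo, hyhi⟩
    obtain ⟨k, hk, hky⟩ := List.getElem_of_mem hy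
    have hkr : r ≤ k := by
      by_contra hlt
      have := h1 k (by omega)
      rw [List.getD_eq_getElem _ _ hk, hky] at this
      omega
    have hrlen : r < coords.length := lt_of_le_of_lt hkr hk
    refine ⟨hrlen, ?_⟩
    have hle : coords.getD r 0 ≤ coords.getD k 0 := by
      rcases Nat.eq_or_lt_of_le hkr with h | h
      · subst h; exact le_refl _
      · rw [List.getD_eq_getElem _ _ hrlen, List.getD_eq_getElem _ _ hk]
        exact (List.pairwise_iff_getElem.mp hs) r k hrlen hk h
    rw [List.getD_eq_getElem _ _ hk, hky] at hle
    omega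

-- A's scan over column blockers equals B's sort + binary search.
theorem col_eq (bp : List (Int × Int)) (x lo hi : Int) :
    (bp.any (fun p => decide (p.1 = x) && decide (lo < p.2) && decide (p.2 < hi))) =
    (decide (pvBsearchGT (PySem.List.sorted ((bp.filter (fun p => decide (p.1 = x))).map Prod.snd) (fun y => y) false) lo 0 (PySem.List.sorted ((bp.filter (fun p => decide (p.1 = x))).map Prod.snd) (fun y => y) false).length < (PySem.List.sorted ((bp.filter (fun p => decide (p.1 = x))).map Prod.snd) (fun y => y) false).length) &&
     decide ((PySem.List.sorted ((bp.filter (fun p => decide (p.1 = x))).map Prod.snd) (fun y => y) false).getD (pvBsearchGT (PySem.List.sorted ((bp.filter (fun p => decide (p.1 = x))).map Prod.snd) (fun y => y) false) lo 0 (PySem.List.sorted ((bp.filter (fun p => decide (p.1 = x))).map Prod.snd) (fun y => y) false).length) 0 < hi)) := by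
  have hs := PySem.List.sorted_pairwise ((bp.filter (fun p => decide (p.1 = x))).map Prod.snd) (fun y => y)
  rw [bsearch_any _ lo hi hs]
  rw [Bool.eq_iff_iff]
  simp only [List.any_eq_true, PySem.List.mem_sorted, List.mem_map, List.mem_filter,
    Bool.and_eq_true, decide_eq_true_eq]
  constructor
  · rintro ⟨p, hp, ⟨hx, hlo⟩, hhi⟩
    exact ⟨p.2, ⟨p, ⟨hp, hx⟩, rfl⟩, hlo, hhi⟩
  · rintro ⟨y, ⟨p, ⟨hp, hx⟩, hpy⟩, hlo, hhi⟩
    exact ⟨p, hp, ⟨hx, by omega⟩, by omega⟩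

-- Row twin of col_eq.
theorem row_eq (bp : List (Int × Int)) (y lo hi : Int) :
    (bp.any (fun p => decide (p.2 = y) && decide (lo < p.1) && decide (p.1 < hi))) =
    (decide (pvBsearchGT (PySem.List.sorted ((bp.filter (fun p => decide (p.2 = y))).map Prod.fst) (fun x => x) false) lo 0 (PySem.List.sorted ((bp.filter (fun p => decide (p.2 = y))).map Prod.fst) (fun x => x) false).length < (PySem.List.sorted ((bp.filter (fun p => decide (p.2 = y))).map Prod.fst) (fun x => x) false).length) &&
     decide ((PySem.List.sorted ((bp.filter (fun p => decide (p.2 = y))).map Prod.fst) (fun x => x) false).getD (pvBsearchGT (PySem.List.sorted ((bp.filter (fun p => decide (p.2 = y))).map Prod.fst) (fun x => x) false) lo 0 (PySem.List.sorted ((bp.filter (fun p => decide (p.2 = y))).map Prod.fst) (fun x => x) false).length) 0 < hi)) := by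
  have hs := PySem.List.sorted_pairwise ((bp.filter (fun p => decide (p.2 = y))).map Prod.fst) (fun x => x)
  rw [bsearch_any _ lo hi hs]
  rw [Bool.eq_iff_iff]
  simp only [List.any_eq_true, PySem.List.mem_sorted, List.mem_map, List.mem_filter,
    Bool.and_eq_true, decide_eq_true_eq]
  constructor
  · rintro ⟨p, hp, ⟨hy, hlo⟩, hhi⟩
    exact ⟨p.1, ⟨p, ⟨hp, hy⟩, rfl⟩, hlo, hhi⟩
  · rintro ⟨xv, ⟨p, ⟨hp, hy⟩, hpx⟩, hlo, hhi⟩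
    exact ⟨p, hp, ⟨hy, by omega⟩, by omega⟩

-- ===== VERDICT =====
theorem segment_hits_blocker_py_spec : Claim_equal_segment_hits_blocker_py := by
  intro start end_ bp _
  unfold Spec_segment_hits_blocker_py segment_hits_blocker_py segment_hits_blocker_py_alt
  simp only [← min_def, ← max_def]
  by_cases hbp : bp = []
  · subst hbp
    split_ifs <;> simp [PySem.List.sorted]
  · simp only [if_neg hbp]
    by_cases h1 : start.1 = end_.1
    · simp only [if_pos h1]
      exact col_eq bp start.1 (min start.2 end_.2) (max start.2 end_.2)
    · simp only [if_neg h1]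
      by_cases h2 : start.2 = end_.2
      · simp only [if_pos h2]
        exact row_eq bp start.2 (min start.1 end_.1) (max start.1 end_.1)
      · simp only [if_neg h2]
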